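-- pv_equiv track=rewrite | github.com/kv3n/foobar | bananagate.py | get_num_not_usable_guards
-- ===== SOURCE A (Python) =====
-- def get_possible_opponents_count(pairing_graph):
--     possible_opponents_count = [0] * len(pairing_graph)
--
--     for guard in range(0, len(pairing_graph)):
--         possible_opponents_count[guard] = sum(pairing_graph[guard])
--
--     return possible_opponents_count
--
-- def remove_guard_from_pairing_graph(pairing_graph, guard):
--     del pairing_graph[guard]
--
--     for other_guard in range(0, len(pairing_graph)):
--         del pairing_graph[other_guard][guard]
--
--     return pairing_graph
--
-- def get_num_not_usable_guards(pairing_graph):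
--     not_usable_guards = 0
--     possible_opponents_count = get_possible_opponents_count(pairing_graph)
--
--     # Clean up all 0 vertex degree edges
--     removable_guards = []
--     for guard in range(0, len(pairing_graph)):
--         if possible_opponents_count[guard] == 0:
--             removable_guards.append(guard)
--             not_usable_guards += 1
--
--     for guard_to_remove in reversed(removable_guards):
--         pairing_graph = remove_guard_from_pairing_graph(pairing_graph, guard_to_remove)
--
--     return not_usable_guards, pairing_graph
-- ===== SOURCE B (Python) =====
-- def get_num_not_usable_guards(pairing_graph):
--     zero = {i for i, row in enumerate(pairing_graph) if sum(row) == 0}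
--     reduced = [[v for j, v in enumerate(row) if j not in zero]
--                for i, row in enumerate(pairing_graph) if i not in zero]
--     return len(zero), reduced
-- ===== Notes on version B (the rewrite author's own statement) =====
-- stated objective: simpler
-- what changed: A computes row sums, then repeatedly mutates the matrix, deleting each zero-degree row and its column guard by guard; B computes the zero-degree index set once and builds the reduced matrix in a single filtering pass over rows and columns.
import Mathlib
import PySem

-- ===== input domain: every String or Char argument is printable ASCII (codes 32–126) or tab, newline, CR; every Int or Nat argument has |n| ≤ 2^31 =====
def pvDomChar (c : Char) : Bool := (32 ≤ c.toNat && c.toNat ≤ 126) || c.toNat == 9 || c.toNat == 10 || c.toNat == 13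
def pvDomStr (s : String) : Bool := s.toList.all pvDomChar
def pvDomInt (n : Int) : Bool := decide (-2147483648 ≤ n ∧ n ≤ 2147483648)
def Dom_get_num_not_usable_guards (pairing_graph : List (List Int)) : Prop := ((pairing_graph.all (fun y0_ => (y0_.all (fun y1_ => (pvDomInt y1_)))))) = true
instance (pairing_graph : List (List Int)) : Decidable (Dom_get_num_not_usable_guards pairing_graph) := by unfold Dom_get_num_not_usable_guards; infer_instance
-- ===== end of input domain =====

-- B replaces A's destructive per-guard row/column deletion loops by a single filtering pass over
-- the precomputed zero-degree index set; A mutates its argument in place, B does not — the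
-- equivalence claimed here is about the RETURN value only.

-- ===== PORT A =====
def get_possible_opponents_count (pairing_graph : List (List Int)) : List Int :=
  (List.range pairing_graph.length).foldl
    (fun poc guard => poc.set guard (pairing_graph.getD guard []).sum)
    (List.replicate pairing_graph.length 0)

-- 'del xs[i]' is ported as List.eraseIdx: exact whenever the index is in range, which
-- Pre_get_num_not_usable_guards guarantees (Python raises IndexError outside it).
def remove_guard_from_pairing_graph (pairing_graph : List (List Int)) (guard : Nat) : List (List Int) :=
  let pg := pairing_graph.eraseIdx guard
  (List.range pg.length).foldl
    (fun m other_guard => m.modify other_guard (fun row => row.eraseIdx guard)) pg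

def get_num_not_usable_guards (pairing_graph : List (List Int)) : Int × List (List Int) :=
  let poc := get_possible_opponents_count pairing_graph
  let acc := (List.range pairing_graph.length).foldl
    (fun (acc : List Nat × Int) guard =>
      if poc.getD guard 0 = 0 then (acc.1 ++ [guard], acc.2 + 1) else acc)
    (([] : List Nat), (0 : Int))
  let pg := acc.1.reverse.foldl (fun m g => remove_guard_from_pairing_graph m g) pairing_graph
  (acc.2, pg)

-- ===== PORT B =====
def get_num_not_usable_guards_alt (pairing_graph : List (List Int)) : Int × List (List Int) :=
  let zero : PySem.Set Int :=
    PySem.Set.ofList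
      (((PySem.List.enumerate pairing_graph).filter (fun p => p.2.sum == 0)).map (·.1))
  let reduced :=
    ((PySem.List.enumerate pairing_graph).filter (fun p => !(PySem.Set.contains zero p.1))).map
      (fun p => ((PySem.List.enumerate p.2).filter (fun q => !(PySem.Set.contains zero q.1))).map (·.2))
  (PySem.Set.len zero, reduced)

-- ===== PRECONDITION & SPEC =====
-- indices (ascending) of the zero-sum rows
def pvZeros (pairing_graph : List (List Int)) : List Nat :=
  (List.range pairing_graph.length).filter (fun g => (pairing_graph.getD g []).sum == 0)

-- Pre_ holds exactly when every 'del' A performs is in range (A raises IndexError otherwise):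
-- when zero-sum row g is processed (descending order), every row still present must extend past
-- column g, account taken of the columns already deleted.
def Pre_get_num_not_usable_guards (pairing_graph : List (List Int)) : Prop :=
  ∀ g ∈ pvZeros pairing_graph, ∀ i ∈ List.range pairing_graph.length,
    ((pairing_graph.getD i []).sum ≠ 0 ∨ i < g) →
      g + ((pvZeros pairing_graph).filter (fun z => g < z)).length < (pairing_graph.getD i []).length
instance (pairing_graph : List (List Int)) : Decidable (Pre_get_num_not_usable_guards pairing_graph) := by unfold Pre_get_num_not_usable_guards; infer_instance

def pvWitness_get_num_not_usable_guards : List (List Int) := [[0, 0], [0, 1]]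

def Spec_get_num_not_usable_guards (pairing_graph : List (List Int)) (out : Int × List (List Int)) : Prop := out = get_num_not_usable_guards_alt pairing_graph
instance (pairing_graph : List (List Int)) (out : Int × List (List Int)) : Decidable (Spec_get_num_not_usable_guards pairing_graph out) := by unfold Spec_get_num_not_usable_guards; infer_instance

-- ===== CLAIM (what is proved, stated in full; the proofs are below) =====
def Claim_equal_get_num_not_usable_guards : Prop := ∀ (pairing_graph : List (List Int)), Dom_get_num_not_usable_guards pairing_graph → Pre_get_num_not_usable_guards pairing_graph → Spec_get_num_not_usable_guards pairing_graph (get_num_not_usable_guards pairing_graph)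

-- ===== LEMMAS AND PROOFS =====

-- 'keep the elements whose (Int) position satisfies p', positions counted from i
def pvKeep {α : Type} (p : Int → Bool) : Int → List α → List α
  | _, [] => []
  | i, a :: t => if p i then a :: pvKeep p (i + 1) t else pvKeep p (i + 1) t

theorem pvKeep_congr {α : Type} {p q : Int → Bool} :
    ∀ (l : List α) (i : Int), (∀ j, i ≤ j → p j = q j) → pvKeep p i l = pvKeep q i l := by
  intro l
  induction l with
  | nil => intro i h; rfl
  | cons a t ih =>
    intro i h
    simp only [pvKeep, h i le_rfl, ih (i + 1) (fun j hj => h j (by omega))]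

theorem pvKeep_all {α : Type} {p : Int → Bool} :
    ∀ (l : List α) (i : Int), (∀ j, i ≤ j → p j = true) → pvKeep p i l = l := by
  intro l
  induction l with
  | nil => intro i h; rfl
  | cons a t ih =>
    intro i h
    simp only [pvKeep, h i le_rfl, if_true, ih (i + 1) (fun j hj => h j (by omega))]

theorem pvKeep_map {α β : Type} (f : α → β) (p : Int → Bool) :
    ∀ (l : List α) (i : Int), pvKeep p i (l.map f) = (pvKeep p i l).map f := by
  intro l
  induction l with
  | nil => intro i; rfl
  | cons a t ih =>
    intro i
    by_cases h : p i = true <;> simp [pvKeep, h, ih]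

theorem pvKeep_eraseIdx {α : Type} :
    ∀ (l : List α) (z : Nat) (i : Int) (p : Int → Bool),
      (∀ j, i + (z : Int) ≤ j → p j = true) →
      pvKeep p i (l.eraseIdx z) = pvKeep (fun j => p j && !(j == i + (z : Int))) i l := by
  intro l
  induction l with
  | nil => intro z i p _; rfl
  | cons a t ih =>
    intro z i p h
    cases z with
    | zero =>
      simp only [List.eraseIdx]
      rw [pvKeep_all t i (fun j hj => h j (by omega))]
      have hpi : (p i && !(i == i + ((0 : Nat) : Int))) = false := by simp
      simp only [pvKeep, hpi, Bool.false_eq_true, if_false]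
      exact (pvKeep_all t (i + 1) (fun j hj => by simp [h j (by omega), show j ≠ i by omega])).symm
    | succ z' =>
      simp only [List.eraseIdx]
      have hc : (i == i + (((z' + 1 : Nat)) : Int)) = false := by
        rw [Bool.eq_iff_iff]; simp; omega
      have hstep : ∀ j : Int, i + 1 + (z' : Int) ≤ j → p j = true := by
        intro j hj; exact h j (by push_cast at hj ⊢; omega)
      have hsh : (i + 1 + (z' : Int)) = i + ((z' + 1 : Nat) : Int) := by push_cast; ring
      by_cases hp : p i = true
      · simp only [pvKeep, hp, hc, Bool.not_false, Bool.and_true, if_true]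
        rw [ih z' (i + 1) p hstep]
        exact congrArg (a :: ·) (pvKeep_congr t (i + 1) (fun j _ => by rw [hsh]))
      · simp only [pvKeep, hp, Bool.false_and, Bool.false_eq_true, if_false]
        rw [ih z' (i + 1) p hstep]
        exact pvKeep_congr t (i + 1) (fun j _ => by rw [hsh])

theorem pvSetAt {α : Type} : ∀ (A : List α) (x : α) (rest : List α) (v : α) (n : Nat),
    n = A.length → (A ++ x :: rest).set n v = A ++ v :: rest := by
  intro A
  induction A with
  | nil => intro x rest v n hn; subst hn; rfl
  | cons a t ih =>
    intro x rest v n hn; subst hn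
    simp only [List.cons_append, List.length_cons, List.set]
    rw [ih x rest v t.length rfl]

theorem pvModifyAt {α : Type} : ∀ (A : List α) (x : α) (rest : List α) (f : α → α) (n : Nat),
    n = A.length → (A ++ x :: rest).modify n f = A ++ f x :: rest := by
  intro A
  induction A with
  | nil => intro x rest f n hn; subst hn; simp [List.modify]
  | cons a t ih =>
    intro x rest f n hn; subst hn
    have h := ih x rest f t.length rfl
    simp only [List.modify] at h ⊢
    simp [h]

theorem pvFoldSet (f : Nat → Int) :
    ∀ (m : Nat) (l0 : List Int), m ≤ l0.length →
      (List.range m).foldl (fun a g => a.set g (f g)) l0 = (List.range m).map f ++ l0.drop m := by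
  intro m
  induction m with
  | zero => intro l0 _; simp
  | succ m ih =>
    intro l0 hm
    rw [List.range_succ, List.foldl_append, ih l0 (by omega)]
    have hdrop : l0.drop m = l0[m] :: l0.drop (m + 1) :=
      List.drop_eq_getElem_cons (by omega)
    rw [hdrop, List.foldl_cons, List.foldl_nil]
    rw [pvSetAt _ _ _ _ m (by simp)]
    simp [List.map_append]

theorem pvFoldModify {α : Type} (f : α → α) :
    ∀ (m : Nat) (l : List α), m ≤ l.length →
      (List.range m).foldl (fun t o => t.modify o f) l = (l.take m).map f ++ l.drop m := by
  intro m
  induction m with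
  | zero => intro l _; simp
  | succ m ih =>
    intro l hm
    rw [List.range_succ, List.foldl_append, ih l (by omega), List.foldl_cons, List.foldl_nil]
    have hdrop : l.drop m = l[m] :: l.drop (m + 1) := List.drop_eq_getElem_cons (by omega)
    rw [hdrop, pvModifyAt _ _ _ _ m (by simp; omega)]
    have hm' : m < l.length := by omega
    rw [show List.take (m + 1) l = List.take m l ++ [l[m]] from by
      rw [List.take_add_one, List.getElem?_eq_getElem hm']; rfl]
    rw [List.map_append, List.append_assoc]
    rfl

theorem poc_eq (pg : List (List Int)) :
    get_possible_opponents_count pg = (List.range pg.length).map (fun g => (pg.getD g []).sum) := by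
  unfold get_possible_opponents_count
  rw [pvFoldSet _ pg.length (List.replicate pg.length (0:Int)) (by simp)]
  simp

theorem remove_guard_eq (m : List (List Int)) (g : Nat) :
    remove_guard_from_pairing_graph m g = (m.eraseIdx g).map (fun r => r.eraseIdx g) := by
  unfold remove_guard_from_pairing_graph
  rw [pvFoldModify _ (m.eraseIdx g).length (m.eraseIdx g) le_rfl]
  simp

theorem pvFoldAcc (P : Nat → Prop) [DecidablePred P] :
    ∀ (l : List Nat) (a1 : List Nat) (a2 : Int),
      l.foldl (fun acc g => if P g then (acc.1 ++ [g], acc.2 + 1) else acc) (a1, a2)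
        = (a1 ++ l.filter (fun g => decide (P g)), a2 + ((l.filter (fun g => decide (P g))).length : Int)) := by
  intro l
  induction l with
  | nil => intro a1 a2; simp
  | cons x t ih =>
    intro x1 x2
    by_cases hx : P x
    · simp only [List.foldl_cons, if_pos hx, ih, List.filter_cons, decide_eq_true hx]
      simp [List.append_assoc]
      ring
    · simp only [List.foldl_cons, if_neg hx, ih, List.filter_cons]
      simp [hx]

theorem pvDescFold :
    ∀ (zs : List Nat) (M : List (List Int)), zs.Pairwise (· > ·) →
      zs.foldl (fun m g => remove_guard_from_pairing_graph m g) M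
        = (pvKeep (fun j => !(zs.any (fun g => (g : Int) == j))) 0 M).map
            (pvKeep (fun j => !(zs.any (fun g => (g : Int) == j))) 0) := by
  intro zs
  induction zs with
  | nil =>
    intro M _
    simp only [List.foldl_nil, List.any_nil, Bool.not_false]
    rw [pvKeep_all M 0 (fun _ _ => rfl)]
    have h : (pvKeep (fun _ => true) 0 : List Int → List Int) = id := by
      funext r; exact pvKeep_all r 0 (fun _ _ => rfl)
    rw [h, List.map_id]
  | cons z rest ih =>
    intro M hpw
    have hlt : ∀ r ∈ rest, r < z := fun r hr => (List.pairwise_cons.mp hpw).1 r hr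
    have hrest := (List.pairwise_cons.mp hpw).2
    rw [List.foldl_cons, ih _ hrest, remove_guard_eq]
    have hqtop : ∀ j : Int, (0 : Int) + (z : Int) ≤ j →
        (!(rest.any (fun g => (g : Int) == j))) = true := by
      intro j hj
      simp only [Bool.not_eq_true', List.any_eq_false]
      intro g hg
      have := hlt g hg
      simp only [beq_iff_eq, ne_eq]
      omega
    rw [pvKeep_map, pvKeep_eraseIdx M z 0 _ hqtop, List.map_map]
    have hfun : ((pvKeep (fun j => !(rest.any (fun g => (g : Int) == j))) 0) ∘ (fun r : List Int => r.eraseIdx z))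
        = fun r : List Int => pvKeep (fun j => (!(rest.any (fun g => (g : Int) == j))) && !(j == 0 + (z : Int))) 0 r := by
      funext r; exact pvKeep_eraseIdx r z 0 _ hqtop
    rw [hfun]
    have hpred : (fun j : Int => (!(rest.any (fun g => (g : Int) == j))) && !(j == 0 + (z : Int)))
        = fun j : Int => !((z :: rest).any (fun g => (g : Int) == j)) := by
      funext j
      simp only [List.any_cons, Bool.not_or, zero_add]
      rw [Bool.and_comm]
      have hco : (j == (z : Int)) = ((z : Int) == j) := by
        rw [Bool.eq_iff_iff]
        simp only [beq_iff_eq]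
        exact eq_comm
      rw [hco]
    rw [hpred]

theorem pvEnumFilterMap {α β : Type} (c : Int → Bool) (f : α → β) :
    ∀ (l : List α) (s : Int),
      ((PySem.List.enumerate l s).filter (fun q => c q.1)).map (fun q => f q.2)
        = (pvKeep c s l).map f := by
  intro l
  induction l with
  | nil => intro s; rfl
  | cons a t ih =>
    intro s
    rw [PySem.List.enumerate_cons]
    by_cases hc : c s = true <;> simp [pvKeep, hc, ih (s + 1)]

theorem pvEnumFilterFst (P : List Int → Bool) :
    ∀ (l : List (List Int)) (s : Int),
      ((PySem.List.enumerate l s).filter (fun p => P p.2)).map (·.1)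
        = ((List.range l.length).filter (fun g => P (l.getD g []))).map (fun g : Nat => s + (g : Int)) := by
  intro l
  induction l with
  | nil => intro s; rfl
  | cons a t ih =>
    intro s
    rw [PySem.List.enumerate_cons, List.length_cons, List.range_succ_eq_map,
      List.filter_cons, List.filter_cons, List.filter_map]
    have hfc : (List.filter ((fun g => P ((a :: t).getD g [])) ∘ Nat.succ) (List.range t.length))
        = List.filter (fun g => P (t.getD g [])) (List.range t.length) := by
      apply List.filter_congr
      intro g _
      simp [Function.comp, Nat.succ_eq_add_one]
    have htail : (List.map (fun g : Nat => s + (g : Int)) (List.map Nat.succ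
          (List.filter (fun g => P (t.getD g [])) (List.range t.length))))
        = List.map (fun g : Nat => (s + 1) + (g : Int)) (List.filter (fun g => P (t.getD g [])) (List.range t.length)) := by
      rw [List.map_map]
      apply List.map_congr_left
      intro g _
      simp [Function.comp, Nat.succ_eq_add_one]
      ring
    by_cases hP : P a = true
    · simp only [List.getD_cons_zero, hP, if_true, List.map_cons, ih (s + 1), hfc, htail]
      simp
    · simp only [List.getD_cons_zero, hP, Bool.false_eq_true, if_false, ih (s + 1), hfc, htail]

theorem pvMain (pg : List (List Int)) :
    get_num_not_usable_guards pg = get_num_not_usable_guards_alt pg := by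
  have hA : get_num_not_usable_guards pg
      = ((((pvZeros pg).length : Nat) : Int),
         (pvKeep (fun j => !((pvZeros pg).any (fun g => (g : Int) == j))) 0 pg).map
           (pvKeep (fun j => !((pvZeros pg).any (fun g => (g : Int) == j))) 0)) := by
    unfold get_num_not_usable_guards
    simp only [poc_eq]
    have hcong : (List.range pg.length).foldl
        (fun (acc : List Nat × Int) guard =>
          if ((List.range pg.length).map (fun g => (pg.getD g []).sum)).getD guard 0 = 0
          then (acc.1 ++ [guard], acc.2 + 1) else acc) ([], 0)
      = (List.range pg.length).foldl
        (fun (acc : List Nat × Int) guard =>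
          if (pg.getD guard []).sum = 0 then (acc.1 ++ [guard], acc.2 + 1) else acc) ([], 0) := by
      apply PySem.List.foldl_congr_mem
      intro acc g hg
      rw [PySem.List.getD_map_range _ _ _ _ (List.mem_range.mp hg)]
    rw [hcong, pvFoldAcc (fun g => (pg.getD g []).sum = 0) (List.range pg.length) [] 0]
    have hflt : (List.range pg.length).filter (fun g => decide ((pg.getD g []).sum = 0)) = pvZeros pg := by
      unfold pvZeros
      apply List.filter_congr
      intro g _
      rw [Bool.eq_iff_iff]; simp
    simp only [List.nil_append, zero_add, hflt]
    have hdesc : (pvZeros pg).reverse.Pairwise (· > ·) := by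
      rw [List.pairwise_reverse]
      exact (List.pairwise_lt_range).filter _
    rw [pvDescFold _ _ hdesc]
    simp only [List.any_reverse]
  have hzl : ((PySem.List.enumerate pg 0).filter (fun p => p.2.sum == 0)).map (·.1)
      = (pvZeros pg).map (fun g : Nat => (g : Int)) := by
    rw [pvEnumFilterFst (fun row => row.sum == 0) pg 0]
    unfold pvZeros
    apply List.map_congr_left
    intro g _
    simp
  have hnd : ((pvZeros pg).map (fun g : Nat => (g : Int))).Nodup := by
    apply List.Nodup.map
    · intro a b h; simpa using h
    · exact (List.nodup_range).filter _
  have hc : ∀ j : Int,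
      PySem.Set.contains ((pvZeros pg).map (fun g : Nat => (g : Int))) j
        = (pvZeros pg).any (fun g => (g : Int) == j) := by
    intro j
    rw [Bool.eq_iff_iff, PySem.Set.contains_iff]
    constructor
    · intro hm
      rcases List.mem_map.mp hm with ⟨g, hg, rfl⟩
      exact List.any_eq_true.mpr ⟨g, hg, by simp⟩
    · intro ha
      rcases List.any_eq_true.mp ha with ⟨g, hg, hb⟩
      exact List.mem_map.mpr ⟨g, hg, eq_of_beq hb⟩
  have hB : get_num_not_usable_guards_alt pg
      = ((((pvZeros pg).length : Nat) : Int),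
         (pvKeep (fun j => !((pvZeros pg).any (fun g => (g : Int) == j))) 0 pg).map
           (pvKeep (fun j => !((pvZeros pg).any (fun g => (g : Int) == j))) 0)) := by
    unfold get_num_not_usable_guards_alt
    simp only [hzl, PySem.Set.ofList_eq_self_of_nodup _ hnd]
    have hcfun : (fun j : Int => !(PySem.Set.contains ((pvZeros pg).map (fun g : Nat => (g : Int))) j))
        = fun j : Int => !((pvZeros pg).any (fun g => (g : Int) == j)) := by
      funext j; rw [hc j]
    have hinner : ∀ row : List Int,
        ((PySem.List.enumerate row 0).filter
            (fun q => !(PySem.Set.contains ((pvZeros pg).map (fun g : Nat => (g : Int))) q.1))).map (fun q => q.2)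
          = pvKeep (fun j => !(PySem.Set.contains ((pvZeros pg).map (fun g : Nat => (g : Int))) j)) 0 row := by
      intro row
      have h := pvEnumFilterMap
        (fun j => !(PySem.Set.contains ((pvZeros pg).map (fun g : Nat => (g : Int))) j))
        id row 0
      simp only [id_eq, List.map_id] at h
      exact h
    simp only [hinner]
    rw [pvEnumFilterMap
        (fun j => !(PySem.Set.contains ((pvZeros pg).map (fun g : Nat => (g : Int))) j))
        (fun row => pvKeep (fun j => !(PySem.Set.contains ((pvZeros pg).map (fun g : Nat => (g : Int))) j)) 0 row) pg 0]
    simp only [hcfun]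
    simp [PySem.Set.len]
  rw [hA, hB]

-- ===== VERDICT (by name: the statement is the Claim_ definition above) =====
theorem get_num_not_usable_guards_spec : Claim_equal_get_num_not_usable_guards := by
  intro pg _ _
  unfold Spec_get_num_not_usable_guards
  exact pvMain pg
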